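-- pv_equiv track=rewrite | github.com/sunnyyeti/Leetcode-solutions | June_30Day_Challenges/Validate IP Address.py | isIPV4
-- ===== SOURCE A (Python) =====
-- def isIPV4(string)->bool:
--     def valid_term(term):
--         if len(term)==0:
--             return False
--         if any(not '0'<=c<='9' for c in term):
--             return False
--         if term[0]=='0' and len(term)>1:
--             return False
--         return 0<=int(term)<=255
--     terms = string.split(".")
--     if len(terms)!=4:
--         return False
--     return all(valid_term(term) for term in terms)
-- ===== SOURCE B (Python) =====
-- def isIPV4(string) -> bool:
--     # One left-to-right scan: parts = dots seen, val = value of the current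
--     # octet (-1 = empty so far); no split, no per-term rescans.
--     parts = 0
--     val = -1
--     for c in string:
--         if c == '.':
--             if val < 0:
--                 return False
--             parts += 1
--             val = -1
--         elif '0' <= c <= '9':
--             d = ord(c) - 48
--             if val < 0:
--                 val = d
--             elif val == 0:
--                 return False  # leading zero
--             else:
--                 val = val * 10 + d
--                 if val > 255:
--                     return False
--         else:
--             return False
--     return parts == 3 and val >= 0
-- ===== Notes on version B (the rewrite author's own statement) =====
-- stated objective: alternative
-- what changed: Replaced A's split-into-terms pass plus per-term length/digit/leading-zero checks and int() conversion by a single left-to-right character scan that keeps only a dot count and the running octet value.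
import Mathlib
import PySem

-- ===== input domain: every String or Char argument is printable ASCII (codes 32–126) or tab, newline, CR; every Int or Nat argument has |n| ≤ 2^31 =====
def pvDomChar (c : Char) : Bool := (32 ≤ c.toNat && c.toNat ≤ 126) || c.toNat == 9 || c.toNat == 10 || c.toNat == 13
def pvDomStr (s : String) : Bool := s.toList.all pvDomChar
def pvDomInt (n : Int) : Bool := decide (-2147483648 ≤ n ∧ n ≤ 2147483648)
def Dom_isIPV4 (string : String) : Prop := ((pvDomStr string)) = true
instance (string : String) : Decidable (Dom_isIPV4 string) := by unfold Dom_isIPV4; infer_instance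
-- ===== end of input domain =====

-- B replaces A's split-into-terms + per-term rescan/int() by a single left-to-right
-- character scan that keeps only a dot count and the running octet value (objective: alternative).

-- ===== PORT A =====
-- hand port of Python's int(term): exact whenever term is a nonempty all-ASCII-digit
-- string, which is guaranteed at its (only) call site by the preceding digit check
def pyIntDigits (cs : List Char) : Int :=
  cs.foldl (fun a c => a * 10 + ((c.toNat : Int) - 48)) 0

def validTermA (term : String) : Bool :=
  if PySem.Str.len term = 0 then false
  else if term.toList.any (fun c => !(decide ('0' ≤ c) && decide (c ≤ '9'))) then false
  else if PySem.Str.pyGet? term 0 == some '0' && decide (1 < PySem.Str.len term) then false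
  else decide (0 ≤ pyIntDigits term.toList) && decide (pyIntDigits term.toList ≤ 255)

def isIPV4 (string : String) : Bool :=
  match PySem.Str.split? string "." with
  | none => false  -- unreachable: the separator "." is non-empty
  | some terms =>
    if PySem.List.len terms ≠ 4 then false
    else terms.all validTermA

-- ===== PORT B =====
-- parts = dots seen so far, val = value of the current octet (-1 = empty so far)
def altLoop : List Char → Int → Int → Bool
  | [], parts, val => decide (parts = 3) && decide (0 ≤ val)
  | c :: cs, parts, val =>
    if c = '.' then
      if val < 0 then false
      else altLoop cs (parts + 1) (-1)
    else if '0' ≤ c ∧ c ≤ '9' then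
      let d : Int := (c.toNat : Int) - 48
      if val < 0 then altLoop cs parts d
      else if val = 0 then false  -- leading zero
      else
        if val * 10 + d > 255 then false
        else altLoop cs parts (val * 10 + d)
    else false

def isIPV4_alt (string : String) : Bool :=
  altLoop string.toList 0 (-1)

-- ===== PRECONDITION & SPEC =====
def Spec_isIPV4 (string : String) (out : Bool) : Prop := out = isIPV4_alt string
instance (string : String) (out : Bool) : Decidable (Spec_isIPV4 string out) := by unfold Spec_isIPV4; infer_instance

-- ===== CLAIM (what is proved, stated in full; the proofs are below) =====
def Claim_equal_isIPV4 : Prop := ∀ (string : String), Dom_isIPV4 string → Spec_isIPV4 string (isIPV4 string)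

-- ===== LEMMAS AND PROOFS =====

-- splitting a char list on '.', keeping empty pieces (Python str.split with sep)
def splitChars : List Char → List (List Char)
  | [] => [[]]
  | c :: cs =>
    if c = '.' then [] :: splitChars cs
    else ((c :: (splitChars cs).headI) :: (splitChars cs).tail)

theorem splitChars_ne_nil (cs : List Char) : splitChars cs ≠ [] := by
  cases cs with
  | nil => simp [splitChars]
  | cons c cs => simp only [splitChars]; split <;> simp

-- list-side version of A's valid_term
def validTermC (t : List Char) : Bool :=
  if t.length = 0 then false
  else if t.any (fun c => !(decide ('0' ≤ c) && decide (c ≤ '9'))) then false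
  else if t[0]? == some '0' && decide (1 < t.length) then false
  else decide (0 ≤ pyIntDigits t) && decide (pyIntDigits t ≤ 255)

theorem validTermA_ofList (t : List Char) : validTermA (String.ofList t) = validTermC t := by
  simp [validTermA, validTermC, PySem.Str.len, PySem.List.pyGet?_zero]

-- A's check, parametrised by the number of already-validated terms
def acheck (parts : Int) (segs : List (List Char)) : Bool :=
  decide (parts + segs.length = 4) && segs.all validTermC

theorem splitOn_go_spec (fuel : Nat) (l cur : List Char) (acc : List (List Char))
    (h : l.length < fuel) :
    PySem.Chars.splitOn.go ['.'] fuel l cur acc =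
      acc.reverse ++ (cur.reverse ++ (splitChars l).headI) :: (splitChars l).tail := by
  induction fuel generalizing l cur acc with
  | zero => omega
  | succ fuel ih =>
    cases l with
    | nil =>
      rw [PySem.Chars.splitOn.go]
      simp [splitChars]
      omega
    | cons c rest =>
      rw [PySem.Chars.splitOn.go]
      simp only [List.isPrefixOf, Bool.and_true, List.length_singleton]
      by_cases hc : c = '.'
      · rw [if_pos (by simp [hc]), List.drop_one, List.tail_cons]
        rw [ih rest [] _ (by simpa using Nat.lt_of_succ_lt_succ (by simpa using h))]
        cases hs : splitChars rest with
        | nil => exact absurd hs (splitChars_ne_nil rest)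
        | cons hseg tseg => simp [splitChars, hs, if_pos hc]
      · rw [if_neg (by simp [Ne.symm hc])]
        rw [ih rest (c :: cur) acc (by simpa using Nat.lt_of_succ_lt_succ (by simpa using h))]
        simp only [splitChars, if_neg hc]
        cases hs : splitChars rest with
        | nil => exact absurd hs (splitChars_ne_nil rest)
        | cons hseg tseg => simp


theorem splitOn_eq_splitChars (cs : List Char) :
    PySem.Chars.splitOn cs ['.'] = splitChars cs := by
  unfold PySem.Chars.splitOn
  rw [splitOn_go_spec cs.length.succ cs [] [] (Nat.lt_succ_self _)]
  cases hs : splitChars cs with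
  | nil => exact absurd hs (splitChars_ne_nil cs)
  | cons h t => simp

-- the invariant tying B's scalar state to the pending segment's digits
def RepSt (ds : List Char) (val : Int) : Prop :=
  (val = -1 ∧ ds = []) ∨
  (ds ≠ [] ∧ (∀ c ∈ ds, '0' ≤ c ∧ c ≤ '9') ∧ (ds.head? = some '0' → ds = ['0']) ∧
    (val = 0 → ds = ['0']) ∧ val = pyIntDigits ds ∧ 0 ≤ val ∧ val ≤ 255)

theorem digit_toNat {c : Char} (h1 : '0' ≤ c) (h2 : c ≤ '9') :
    48 ≤ c.toNat ∧ c.toNat ≤ 57 := by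
  simp [Char.le_def, UInt32.le_iff_toNat_le] at h1 h2
  exact ⟨h1, h2⟩

theorem any_nondigit_false {ds : List Char} (hdig : ∀ c ∈ ds, '0' ≤ c ∧ c ≤ '9') :
    (ds.any fun c => !(decide ('0' ≤ c) && decide (c ≤ '9'))) = false := by
  simp only [List.any_eq_false]
  intro c hcm
  simp [(hdig c hcm).1, (hdig c hcm).2]

theorem validTermC_of_rep {ds : List Char} {val : Int}
    (h : ds ≠ [] ∧ (∀ c ∈ ds, '0' ≤ c ∧ c ≤ '9') ∧ (ds.head? = some '0' → ds = ['0']) ∧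
      (val = 0 → ds = ['0']) ∧ val = pyIntDigits ds ∧ 0 ≤ val ∧ val ≤ 255) :
    validTermC ds = true := by
  obtain ⟨hne, hdig, hlead, _, hval, h0, h255⟩ := h
  unfold validTermC
  rw [if_neg (by simpa using hne), if_neg (fun hq => by rw [any_nondigit_false hdig] at hq; exact Bool.false_ne_true hq)]
  have hside : ¬ (ds[0]? == some '0' && decide (1 < ds.length)) = true := by
    intro hbad
    simp only [Bool.and_eq_true, beq_iff_eq, decide_eq_true_eq] at hbad
    obtain ⟨hz, hlen⟩ := hbad
    have : ds.head? = some '0' := by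
      cases ds with
      | nil => simp at hz
      | cons a t => simpa using hz
    have := hlead this
    simp [this] at hlen
  rw [if_neg hside]
  simp [← hval, h0, h255]

theorem validTermC_of_mem_not_digit {t : List Char} {c : Char}
    (hc : c ∈ t) (hnd : ¬ ('0' ≤ c ∧ c ≤ '9')) : validTermC t = false := by
  unfold validTermC
  rw [if_neg (by rintro h; simp [List.length_eq_zero_iff] at h; simp [h] at hc)]
  rw [if_pos (List.any_eq_true.mpr ⟨c, hc, by
      rcases Decidable.not_and_iff_not_or_not.mp hnd with h | h <;> simp [h]⟩)]

theorem validTermC_zero_cons (x : Char) (xs : List Char) :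
    validTermC ('0' :: x :: xs) = false := by
  unfold validTermC
  rw [if_neg (by simp)]
  by_cases hany : ('0' :: x :: xs).any (fun c => !(decide ('0' ≤ c) && decide (c ≤ '9')))
  · rw [if_pos hany]
  · rw [if_neg hany, if_pos (by simp)]

theorem foldl_digits_ge (ys : List Char) (a : Int) (ha : 0 ≤ a)
    (hd : ∀ c ∈ ys, '0' ≤ c ∧ c ≤ '9') :
    a ≤ ys.foldl (fun a c => a * 10 + ((c.toNat : Int) - 48)) a := by
  induction ys generalizing a with
  | nil => simp
  | cons c cs ih =>
    have hb := digit_toNat (hd c (by simp)).1 (hd c (by simp)).2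
    simp only [List.foldl_cons]
    calc a ≤ a * 10 + ((c.toNat : Int) - 48) := by omega
      _ ≤ _ := ih _ (by omega) (fun x hx => hd x (by simp [hx]))

theorem validTermC_big {ds : List Char} (hds : ∀ c ∈ ds, '0' ≤ c ∧ c ≤ '9')
    (hbig : 255 < pyIntDigits ds) : validTermC (ds) = false := by
  unfold validTermC
  by_cases h0 : ds.length = 0
  · rw [if_pos h0]
  rw [if_neg h0]
  rw [if_neg (fun hq => by rw [any_nondigit_false hds] at hq; exact Bool.false_ne_true hq)]
  by_cases hl : (ds[0]? == some '0' && decide (1 < ds.length)) = true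
  · rw [if_pos hl]
  · rw [if_neg hl]
    simp [pyIntDigits] at hbig ⊢
    omega

theorem altLoop_spec (cs : List Char) (parts val : Int) (ds : List Char)
    (h : RepSt ds val) :
    altLoop cs parts val =
      acheck parts ((ds ++ (splitChars cs).headI) :: (splitChars cs).tail) := by
  induction cs generalizing parts val ds with
  | nil =>
    rcases h with ⟨hv, hds⟩ | hrep
    · subst hv; subst hds
      simp [altLoop, splitChars, acheck, validTermC]
    · have hvt := validTermC_of_rep hrep
      obtain ⟨hne, hdig, hlead, h0ds, hval, h0, h255⟩ := hrep
      simp only [altLoop, splitChars, List.headI, List.tail_cons, List.append_nil, acheck,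
        List.all_cons, List.all_nil, hvt, Bool.and_true, List.length_singleton]
      rw [decide_eq_true (by omega : (0:Int) ≤ val), Bool.and_true]
      exact decide_eq_decide.mpr (by constructor <;> (intro; omega))
  | cons c cs ih =>
    cases hs : splitChars cs with
    | nil => exact absurd hs (splitChars_ne_nil cs)
    | cons hseg tseg =>
    by_cases hdot : c = '.'
    · subst hdot
      rcases h with ⟨hv, hds⟩ | hrep
      · subst hv; subst hds
        have hL : altLoop ('.' :: cs) parts (-1) = false := by
          show (if ('.' : Char) = '.' then if (-1 : Int) < 0 then false
                else altLoop cs (parts + 1) (-1) else _) = _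
          rw [if_pos rfl, if_pos (by omega)]
        have hR : splitChars ('.' :: cs) = [] :: hseg :: tseg := by simp [splitChars, hs]
        rw [hL, hR]
        simp [acheck, validTermC]
      · have hvt := validTermC_of_rep hrep
        obtain ⟨hne, hdig, hlead, h0ds, hval, h0, h255⟩ := hrep
        have hstep : altLoop ('.' :: cs) parts val = altLoop cs (parts + 1) (-1) := by
          show (if ('.' : Char) = '.' then if val < 0 then false
                else altLoop cs (parts + 1) (-1) else _) = _
          rw [if_pos rfl, if_neg (by omega : ¬ val < 0)]
        rw [hstep, ih (parts + 1) (-1) [] (Or.inl ⟨rfl, rfl⟩), hs]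
        have hR : splitChars ('.' :: cs) = [] :: hseg :: tseg := by simp [splitChars, hs]
        rw [hR]
        simp only [acheck, List.nil_append, List.all_cons, hvt, Bool.true_and,
          List.length_cons, List.headI, List.tail_cons, List.append_nil]
        congr 1
        exact decide_eq_decide.mpr (by push_cast; constructor <;> (intro; omega))
    · by_cases hdig : '0' ≤ c ∧ c ≤ '9'
      · have hb := digit_toNat hdig.1 hdig.2
        simp only [splitChars, if_neg hdot, hs, List.headI, List.tail_cons]
        simp only [altLoop, if_neg hdot, if_pos hdig]
        rcases h with ⟨hv, hds⟩ | hrep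
        · subst hv; subst hds
          rw [if_pos (by omega : (-1:Int) < 0)]
          have hrep' : RepSt [c] ((c.toNat : Int) - 48) := by
            refine Or.inr ⟨by simp, ?_, ?_, ?_, ?_, by omega, by omega⟩
            · intro x hx; simp at hx; subst hx; exact hdig
            · intro hz; simp at hz; simp [hz]
            · intro hz
              have h48 : c.toNat = 48 := by omega
              have hc0 : c = '0' := by
                rw [← Char.ofNat_toNat c, h48]
              simp [hc0]
            · simp [pyIntDigits]
          rw [ih parts _ [c] hrep', hs]
          simp
        · have hvt := validTermC_of_rep hrep
          obtain ⟨hne, hdig2, hlead, h0ds, hval, h0, h255⟩ := hrep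
          rw [if_neg (by omega : ¬ val < 0)]
          by_cases hz : val = 0
          · rw [if_pos hz]
            have hds0 : ds = ['0'] := h0ds hz
            subst hds0
            simp [acheck, validTermC_zero_cons]
          · rw [if_neg hz]
            by_cases hbig : val * 10 + ((c.toNat : Int) - 48) > 255
            · rw [if_pos hbig]
              have hfalse : validTermC (ds ++ c :: hseg) = false := by
                by_cases hall : ∀ x ∈ ds ++ c :: hseg, '0' ≤ x ∧ x ≤ '9'
                · apply validTermC_big hall
                  have h1 : pyIntDigits (ds ++ [c]) = val * 10 + ((c.toNat : Int) - 48) := by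
                    simp [pyIntDigits, List.foldl_append, hval]
                  have h2 : pyIntDigits ((ds ++ [c]) ++ hseg) = (hseg.foldl
                      (fun a x => a * 10 + ((x.toNat : Int) - 48)) (pyIntDigits (ds ++ [c]))) := by
                    simp [pyIntDigits, List.foldl_append]
                  have h3 := foldl_digits_ge hseg (pyIntDigits (ds ++ [c]))
                    (by rw [h1]; omega)
                    (fun x hx => hall x (by simp [hx]))
                  have : (ds ++ [c]) ++ hseg = ds ++ c :: hseg := by simp
                  rw [← this, h2]
                  omega
                · obtain ⟨x, hximp⟩ := not_forall.mp hall
                  obtain ⟨hx, hnd⟩ := Classical.not_imp.mp hximp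
                  exact validTermC_of_mem_not_digit hx hnd
              simp [acheck, hfalse]
            · rw [if_neg hbig]
              have hrep' : RepSt (ds ++ [c]) (val * 10 + ((c.toNat : Int) - 48)) := by
                refine Or.inr ⟨by simp, ?_, ?_, ?_, ?_, by omega, by omega⟩
                · intro x hx
                  rcases List.mem_append.mp hx with h1 | h1
                  · exact hdig2 x h1
                  · simp at h1; subst h1; exact hdig
                · intro hh
                  have hh' : ds.head? = some '0' := by
                    cases ds with
                    | nil => exact absurd rfl hne
                    | cons a t => simpa using hh
                  have := hlead hh'
                  rw [this, pyIntDigits] at hval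
                  simp at hval
                  omega
                · intro hh; omega
                · simp [pyIntDigits, List.foldl_append, hval]
              rw [ih parts _ (ds ++ [c]) hrep', hs]
              simp
      · simp only [altLoop, if_neg hdot, if_neg hdig]
        simp only [splitChars, if_neg hdot, hs, List.headI, List.tail_cons]
        have hfalse : validTermC (ds ++ c :: hseg) = false :=
          validTermC_of_mem_not_digit (by simp) hdig
        simp [acheck, hfalse]

-- ===== VERDICT (by name: the statement is the Claim_ definition above) =====
theorem isIPV4_spec : Claim_equal_isIPV4 := by
  unfold Claim_equal_isIPV4
  intro s _
  unfold Spec_isIPV4 isIPV4 isIPV4_alt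
  rw [altLoop_spec s.toList 0 (-1) [] (Or.inl ⟨rfl, rfl⟩)]
  have hdot : ".".toList = ['.'] := rfl
  simp only [PySem.Str.split?, PySem.Chars.split?, hdot, List.isEmpty_cons, Bool.false_eq_true,
    if_false, Option.map_some]
  rw [splitOn_eq_splitChars]
  cases hs : splitChars s.toList with
  | nil => exact absurd hs (splitChars_ne_nil s.toList)
  | cons hseg tseg =>
    simp only [List.headI, List.tail_cons, List.nil_append, acheck, List.all_cons,
      List.length_cons, PySem.List.len_eq, List.length_map, List.all_map]
    split_ifs with h4
    · rw [decide_eq_false (by omega), Bool.false_and]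
    · rw [decide_eq_true (by omega), Bool.true_and]
      simp [validTermA_ofList, Function.comp_def]
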